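-- pv_equiv track=rewrite | github.com/pypi-data/pypi-mirror-378 | packages/pasvg/pasvg-1.0.4-py3-none-any.whl/pasvg/pasvg_generator.py | _create_tech_badges
-- ===== SOURCE A (Python) =====
-- from typing import Dict, List, Tuple
--
-- def _create_tech_badges(technologies: List[str]) -> str:
--     badges = []
--     x_offset = 0
--     for tech in technologies:
--         width = len(tech) * 8 + 20
--         badges.append(f'''
-- <g transform="translate({x_offset}, 0)">
--     <rect width="{width}" height="20" rx="10" fill="#3b82f6" opacity="0.1"/>
--     <text x="{width//2}" y="14" text-anchor="middle" class="pasvg-section" fill="#3b82f6">{tech}</text>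
-- </g>''')
--         x_offset += width + 10
--     return '\n'.join(badges)
-- ===== SOURCE B (Python) =====
-- def _create_tech_badges(technologies):
--     # Divide and conquer: each badge's x-offset is the closed form
--     # 30*i + 8*chars (chars = total length of all earlier names), so the two
--     # halves can be rendered independently and joined -- no running accumulator.
--     def go(items, i, chars):
--         if not items:
--             return ''
--         if len(items) == 1:
--             t = items[0]
--             w = 8 * len(t) + 20
--             x = 30 * i + 8 * chars
--             return f'''
-- <g transform="translate({x}, 0)">
--     <rect width="{w}" height="20" rx="10" fill="#3b82f6" opacity="0.1"/>
--     <text x="{w // 2}" y="14" text-anchor="middle" class="pasvg-section" fill="#3b82f6">{t}</text>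
-- </g>'''
--         mid = len(items) // 2
--         left = items[:mid]
--         return (go(left, i, chars) + '\n'
--                 + go(items[mid:], i + mid, chars + sum(len(t) for t in left)))
--     return go(technologies, 0, 0)
-- ===== Notes on version B (the rewrite author's own statement) =====
-- stated objective: alternative
-- what changed: Replaces the single loop that appends to a badge list while threading a running x_offset (joined at the end) with a divide-and-conquer that renders the two halves independently, each badge's x-offset obtained from the closed form 30*i + 8*(total length of earlier names) instead of a carried accumulator.
import Mathlib
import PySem

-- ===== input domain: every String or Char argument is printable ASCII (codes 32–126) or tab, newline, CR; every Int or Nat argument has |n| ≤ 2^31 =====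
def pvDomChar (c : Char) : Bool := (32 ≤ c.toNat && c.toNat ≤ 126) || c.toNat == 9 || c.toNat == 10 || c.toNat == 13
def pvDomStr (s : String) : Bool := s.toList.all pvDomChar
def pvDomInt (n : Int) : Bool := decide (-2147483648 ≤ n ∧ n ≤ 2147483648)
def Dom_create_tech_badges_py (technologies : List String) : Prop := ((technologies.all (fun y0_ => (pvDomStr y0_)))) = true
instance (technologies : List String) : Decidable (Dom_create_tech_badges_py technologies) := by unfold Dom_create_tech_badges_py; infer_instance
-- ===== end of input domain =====

-- B replaces A's list-append loop with a carried x_offset (joined at the end) by a divide-and-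
-- conquer whose offsets come from the closed form 30*i + 8*(chars so far); return values proved equal.

-- ===== PORT A =====
-- A's f-string badge block (PySem.Int.toStr = str(n); floordiv = //)
def pvBadgeA (x w : Int) (t : String) : String :=
  "\n<g transform=\"translate(" ++ PySem.Int.toStr x ++ ", 0)\">\n    <rect width=\"" ++
  PySem.Int.toStr w ++ "\" height=\"20\" rx=\"10\" fill=\"#3b82f6\" opacity=\"0.1\"/>\n    <text x=\"" ++
  PySem.Int.toStr (PySem.Int.floordiv w 2) ++
  "\" y=\"14\" text-anchor=\"middle\" class=\"pasvg-section\" fill=\"#3b82f6\">" ++ t ++ "</text>\n</g>"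

def create_tech_badges_py (technologies : List String) : String :=
  -- for tech in technologies: badges.append(…); x_offset += width + 10
  let res := technologies.foldl
    (fun (acc : List String × Int) tech =>
      let width : Int := PySem.Str.len tech * 8 + 20
      (acc.1 ++ [pvBadgeA acc.2 width tech], acc.2 + width + 10))
    ([], 0)
  PySem.Str.join "\n" res.1

-- ===== PORT B =====
-- B's f-string badge block (same template text; B computes x in closed form)
def pvBadgeB (x w : Int) (t : String) : String :=
  "\n<g transform=\"translate(" ++ PySem.Int.toStr x ++ ", 0)\">\n    <rect width=\"" ++
  PySem.Int.toStr w ++ "\" height=\"20\" rx=\"10\" fill=\"#3b82f6\" opacity=\"0.1\"/>\n    <text x=\"" ++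
  PySem.Int.toStr (PySem.Int.floordiv w 2) ++
  "\" y=\"14\" text-anchor=\"middle\" class=\"pasvg-section\" fill=\"#3b82f6\">" ++ t ++ "</text>\n</g>"

-- def go(items, i, chars): divide and conquer at mid = len(items)//2
-- (items[:mid] / items[mid:] with 0 ≤ mid ≤ len are exactly List.take/drop — PySem slice_to/slice_from)
def pvGo : List String → Int → Int → String
  | [], _, _ => ""
  | [t], i, chars => pvBadgeB (30 * i + 8 * chars) (8 * PySem.Str.len t + 20) t
  | t :: u :: rest, i, chars =>
    pvGo ((t :: u :: rest).take ((t :: u :: rest).length / 2)) i chars ++ "\n" ++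
    pvGo ((t :: u :: rest).drop ((t :: u :: rest).length / 2))
      (i + (((t :: u :: rest).length / 2 : Nat) : Int))
      (chars + (((t :: u :: rest).take ((t :: u :: rest).length / 2)).map
        (fun s => (PySem.Str.len s : Int))).sum)
  termination_by items _ _ => items.length
  decreasing_by
  · simp [List.length_take]; omega
  · simp [List.length_drop]; omega

def create_tech_badges_py_alt (technologies : List String) : String :=
  pvGo technologies 0 0

-- ===== PRECONDITION & SPEC =====
def Spec_create_tech_badges_py (technologies : List String) (out : String) : Prop := out = create_tech_badges_py_alt technologies
instance (technologies : List String) (out : String) : Decidable (Spec_create_tech_badges_py technologies out) := by unfold Spec_create_tech_badges_py; infer_instance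

-- ===== CLAIM =====
def Claim_equal_create_tech_badges_py : Prop := ∀ (technologies : List String), Dom_create_tech_badges_py technologies → Spec_create_tech_badges_py technologies (create_tech_badges_py technologies)

-- ===== LEMMAS AND PROOFS =====

-- A's badge list as a structural recursion on the input
def pvAux : List String → Int → List String
  | [], _ => []
  | t :: ts, x =>
    pvBadgeA x (PySem.Str.len t * 8 + 20) t :: pvAux ts (x + (PySem.Str.len t * 8 + 20) + 10)

theorem pvFoldA (ts : List String) (bs : List String) (x : Int) :
    (ts.foldl
      (fun (acc : List String × Int) tech =>
        let width : Int := PySem.Str.len tech * 8 + 20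
        (acc.1 ++ [pvBadgeA acc.2 width tech], acc.2 + width + 10))
      (bs, x)).1 = bs ++ pvAux ts x := by
  induction ts generalizing bs x with
  | nil => simp [pvAux]
  | cons t ts ih =>
    rw [List.foldl_cons]
    show (List.foldl _ (bs ++ [pvBadgeA x (PySem.Str.len t * 8 + 20) t],
        x + (PySem.Str.len t * 8 + 20) + 10) ts).1 = _
    rw [ih]
    simp [pvAux, List.append_assoc]

theorem pvAux_length (ts : List String) (x : Int) : (pvAux ts x).length = ts.length := by
  induction ts generalizing x with
  | nil => rfl
  | cons t ts ih => simp [pvAux, ih]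

-- shifting pvAux across an append: the offset advances by 8·Σlen + 30·count
theorem pvAux_append (xs ys : List String) (x : Int) :
    pvAux (xs ++ ys) x
      = pvAux xs x ++ pvAux ys (x + 8 * (xs.map (fun s => (PySem.Str.len s : Int))).sum
          + 30 * xs.length) := by
  induction xs generalizing x with
  | nil => simp [pvAux]
  | cons t xs ih =>
    simp only [List.cons_append, pvAux, ih, List.map_cons, List.sum_cons, List.length_cons]
    have : x + (PySem.Str.len t * 8 + 20) + 10
          + 8 * (xs.map (fun s => (PySem.Str.len s : Int))).sum + 30 * xs.length
        = x + 8 * (PySem.Str.len t + (xs.map (fun s => (PySem.Str.len s : Int))).sum)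
          + 30 * (xs.length + 1) := by push_cast; ring
    rw [this]
    push_cast
    ring_nf

-- ''.join on [] and on a singleton
theorem strJoin_nil (sep : String) : PySem.Str.join sep [] = "" := by
  simp [PySem.Str.join, PySem.Chars.join, List.intercalate]

theorem strJoin_one (sep a : String) : PySem.Str.join sep [a] = a := by
  simp [PySem.Str.join, PySem.Chars.join_singleton]

-- '\n'.join splits off its head on a two-or-more element list
theorem strJoin_cc (a b : String) (rest : List String) :
    PySem.Str.join "\n" (a :: b :: rest) = a ++ "\n" ++ PySem.Str.join "\n" (b :: rest) := by
  simp [PySem.Str.join, PySem.Chars.join_cons_cons, String.ofList_append, String.append_assoc]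
  rw [show ('\n' :: PySem.Chars.join ['\n'] (b.toList :: List.map String.toList rest))
      = ['\n'] ++ PySem.Chars.join ['\n'] (b.toList :: List.map String.toList rest) from rfl,
    String.ofList_append]

-- '\n'.join distributes over an append of two nonempty lists
theorem strJoin_append (l1 l2 : List String) (h1 : l1 ≠ []) (h2 : l2 ≠ []) :
    PySem.Str.join "\n" (l1 ++ l2)
      = PySem.Str.join "\n" l1 ++ "\n" ++ PySem.Str.join "\n" l2 := by
  induction l1 with
  | nil => exact absurd rfl h1
  | cons a l1 ih =>
    cases l1 with
    | nil =>
      cases l2 with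
      | nil => exact absurd rfl h2
      | cons b l2 => simp [strJoin_one, strJoin_cc]
    | cons b l1' =>
      rw [List.cons_append, List.cons_append, strJoin_cc,
        ← List.cons_append, ih (by simp), strJoin_cc]
      simp [String.append_assoc]

-- B's divide-and-conquer equals '\n'.join of A's badge list at the closed-form offset
theorem pvGoJoin (ts : List String) (i chars : Int) :
    pvGo ts i chars = PySem.Str.join "\n" (pvAux ts (30 * i + 8 * chars)) := by
  induction ts, i, chars using pvGo.induct with
  | case1 i chars => simp [pvGo, pvAux, strJoin_nil]
  | case2 t i chars =>
    rw [pvGo]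
    simp only [pvAux, strJoin_one]
    have h2 : (8 : Int) * PySem.Str.len t + 20 = PySem.Str.len t * 8 + 20 := by ring
    rw [h2]; rfl
  | case3 t u rest i chars ih1 ih2 =>
    rw [pvGo, ih1, ih2]
    have hsplit : (t :: u :: rest) =
        (t :: u :: rest).take ((t :: u :: rest).length / 2)
          ++ (t :: u :: rest).drop ((t :: u :: rest).length / 2) := by
      simp
    conv_rhs => rw [hsplit]
    set L := (t :: u :: rest).take ((t :: u :: rest).length / 2) with hL
    set R := (t :: u :: rest).drop ((t :: u :: rest).length / 2) with hR
    have hLlen : L.length = (t :: u :: rest).length / 2 := by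
      rw [hL]; simp [List.length_take]; omega
    have hLne : L ≠ [] := by
      intro h; rw [h] at hLlen; simp at hLlen; omega
    have hRne : R ≠ [] := by
      rw [hR]; simp [List.drop_eq_nil_iff]; omega
    rw [pvAux_append, strJoin_append _ _
      (by intro h; have := pvAux_length L (30 * i + 8 * chars); rw [h] at this;
          exact hLne (List.length_eq_zero_iff.mp this.symm))
      (by intro h; have := pvAux_length R (30 * i + 8 * chars
            + 8 * (L.map (fun s => (PySem.Str.len s : Int))).sum + 30 * L.length);
          rw [h] at this;
          exact hRne (List.length_eq_zero_iff.mp this.symm))]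
    congr 1
    have : 30 * (i + (((t :: u :: rest).length / 2 : Nat) : Int))
          + 8 * (chars + (L.map (fun s => (PySem.Str.len s : Int))).sum)
        = 30 * i + 8 * chars + 8 * (L.map (fun s => (PySem.Str.len s : Int))).sum
          + 30 * L.length := by
      rw [hLlen]; push_cast; ring
    rw [this]

-- ===== VERDICT =====
theorem create_tech_badges_py_spec : Claim_equal_create_tech_badges_py := by
  intro ts _
  show _ = _
  simp only [create_tech_badges_py, create_tech_badges_py_alt, pvFoldA, List.nil_append,
    pvGoJoin]
  norm_num
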